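-- pv_equiv track=rewrite | github.com/HanzoRazer/code-analysis-tool | tests/test_openapi_breaking_policy_sorted_unique.py | _is_sorted_unique
-- ===== SOURCE A (Python) =====
-- def _item_key(it: dict) -> tuple:
--     kind = it.get("kind")
--     op = it.get("op")
--     path = it.get("path")
--     loc = it.get("location") or ""
--
--     # Schema guarantees kind + (op or path). We enforce deterministic keying here.
--     if op is not None:
--         return ("op", str(kind), str(op), str(loc))
--     return ("path", str(kind), str(path), str(loc))
--
-- def _is_sorted_unique(items: list[dict]) -> tuple[bool, list[tuple], list[tuple]]:
--     keys = [_item_key(it) for it in items]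
--     sorted_keys = sorted(keys)
--     duplicates = []
--     seen: set[tuple] = set()
--     for k in keys:
--         if k in seen:
--             duplicates.append(k)
--         else:
--             seen.add(k)
--     return keys == sorted_keys, duplicates, keys
-- ===== SOURCE B (Python) =====
-- def _item_key(it: dict) -> tuple:
--     kind = it.get("kind")
--     op = it.get("op")
--     path = it.get("path")
--     loc = it.get("location") or ""
--
--     if op is not None:
--         return ("op", str(kind), str(op), str(loc))
--     return ("path", str(kind), str(path), str(loc))
--
-- def _is_sorted_unique(items: list[dict]) -> tuple[bool, list[tuple], list[tuple]]:
--     # One pass: sortedness by adjacent comparison (no sort), duplicates via a set.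
--     ok = True
--     prev = None
--     seen: set[tuple] = set()
--     duplicates = []
--     keys = []
--     for it in items:
--         k = _item_key(it)
--         if prev is not None and k < prev:
--             ok = False
--         if k in seen:
--             duplicates.append(k)
--         else:
--             seen.add(k)
--         keys.append(k)
--         prev = k
--     return ok, duplicates, keys
-- ===== Notes on version B (the rewrite author's own statement) =====
-- stated objective: alternative
-- what changed: B drops the sorted() call: one pass over the items checks non-decreasing order by comparing each key to the previous one while collecting duplicates with the same set, instead of building keys, sorting a copy and comparing the two lists (O(n) adjacent comparisons instead of an O(n log n) sort, though not measurably faster in CPython).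
import Mathlib
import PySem

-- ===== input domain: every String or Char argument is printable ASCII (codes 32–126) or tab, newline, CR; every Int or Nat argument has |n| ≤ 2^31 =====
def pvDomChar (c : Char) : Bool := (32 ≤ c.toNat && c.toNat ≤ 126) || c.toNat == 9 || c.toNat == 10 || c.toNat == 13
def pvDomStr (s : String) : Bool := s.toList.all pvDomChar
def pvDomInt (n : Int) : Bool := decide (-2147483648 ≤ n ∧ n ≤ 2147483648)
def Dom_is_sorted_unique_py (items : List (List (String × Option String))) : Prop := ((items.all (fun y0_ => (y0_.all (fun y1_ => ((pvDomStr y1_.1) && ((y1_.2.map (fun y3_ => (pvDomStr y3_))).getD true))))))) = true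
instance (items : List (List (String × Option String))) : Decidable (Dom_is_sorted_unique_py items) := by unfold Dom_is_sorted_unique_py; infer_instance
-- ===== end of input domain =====

-- B replaces A's sort-and-compare sortedness test by an adjacent-pair comparison merged
-- into the single duplicate-collecting pass (no sort built).

-- ===== PORT A =====
-- shared module helper _item_key (used verbatim by both Pythons):
-- str(x) on an Optional[str] value: None -> "None", s -> s
def pvStrOfOpt : Option String → String
  | none => "None"
  | some s => s

def pvItemKey (it : List (String × Option String)) : List String :=
  let d := PySem.Dict.ofList it
  let kind := PySem.Dict.getD d "kind" none
  let op := PySem.Dict.getD d "op" none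
  let path := PySem.Dict.getD d "path" none
  -- loc = it.get("location") or ""  (None -> "", "" -> "")
  let loc := (PySem.Dict.getD d "location" none).getD ""
  match op with
  | some o => ["op", pvStrOfOpt kind, o, loc]
  | none => ["path", pvStrOfOpt kind, pvStrOfOpt path, loc]

-- Python compares tuples of strings lexicographically, strings by code points; we compare
-- through this order-embedding into List (List Nat) (exact for Python's order, and
-- kernel-reducible, unlike Lean's String.ltb).
def pvKeyCodes (k : List String) : List (List Nat) :=
  k.map (fun s => s.toList.map Char.toNat)

def is_sorted_unique_py (items : List (List (String × Option String))) :
    Bool × List (List String) × List (List String) :=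
  let keys := items.map pvItemKey
  let sorted_keys := PySem.List.sorted keys pvKeyCodes false
  let ds := keys.foldl
    (fun (st : List (List String) × PySem.Set (List String)) k =>
      if PySem.Set.contains st.2 k then (st.1 ++ [k], st.2)
      else (st.1, PySem.Set.add st.2 k))
    ([], PySem.Set.empty)
  (decide (keys = sorted_keys), ds.1, keys)

-- ===== PORT B =====
-- the single loop of Source B: prev-key comparison for sortedness, set for duplicates
def pvAltLoop (prev : Option (List String)) (ok : Bool)
    (seen : PySem.Set (List String)) (dups : List (List String))
    (keysAcc : List (List String)) :
    List (List (String × Option String)) → Bool × List (List String) × List (List String)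
  | [] => (ok, dups, keysAcc)
  | it :: rest =>
    let k := pvItemKey it
    let ok' := match prev with
      | some p => if pvKeyCodes k < pvKeyCodes p then false else ok
      | none => ok
    let sd := if PySem.Set.contains seen k then (seen, dups ++ [k])
              else (PySem.Set.add seen k, dups)
    pvAltLoop (some k) ok' sd.1 sd.2 (keysAcc ++ [k]) rest

def is_sorted_unique_py_alt (items : List (List (String × Option String))) :
    Bool × List (List String) × List (List String) :=
  pvAltLoop none true PySem.Set.empty [] [] items

-- ===== PRECONDITION & SPEC =====
def Spec_is_sorted_unique_py (items : List (List (String × Option String))) (out : Bool × List (List String) × List (List String)) : Prop := out = is_sorted_unique_py_alt items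
instance (items : List (List (String × Option String))) (out : Bool × List (List String) × List (List String)) : Decidable (Spec_is_sorted_unique_py items out) := by unfold Spec_is_sorted_unique_py; infer_instance

-- ===== CLAIM (what is proved, stated in full; the proofs are below) =====
def Claim_equal_is_sorted_unique_py : Prop := ∀ (items : List (List (String × Option String))), Dom_is_sorted_unique_py items → Spec_is_sorted_unique_py items (is_sorted_unique_py items)

-- ===== LEMMAS AND PROOFS =====

-- A's duplicate-collecting step, as a named function (A's fold is literally this step)
def pvDupStep (st : List (List String) × PySem.Set (List String)) (k : List String) :
    List (List String) × PySem.Set (List String) :=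
  if PySem.Set.contains st.2 k then (st.1 ++ [k], st.2)
  else (st.1, PySem.Set.add st.2 k)

-- B's running sortedness check over the key list, with the previous key
def pvChainOk : Option (List String) → List (List String) → Bool
  | _, [] => true
  | none, k :: ks => pvChainOk (some k) ks
  | some p, k :: ks => (!decide (pvKeyCodes k < pvKeyCodes p)) && pvChainOk (some k) ks

lemma pvAltLoop_spec (items : List (List (String × Option String)))
    (prev : Option (List String)) (ok : Bool) (seen : PySem.Set (List String))
    (dups keysAcc : List (List String)) :
    pvAltLoop prev ok seen dups keysAcc items =
      (ok && pvChainOk prev (items.map pvItemKey),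
       ((items.map pvItemKey).foldl pvDupStep (dups, seen)).1,
       keysAcc ++ items.map pvItemKey) := by
  induction items generalizing prev ok seen dups keysAcc with
  | nil => simp [pvAltLoop, pvChainOk]
  | cons it rest ih =>
    simp only [pvAltLoop, List.map_cons, List.foldl_cons]
    rw [ih]
    simp only [Prod.mk.injEq]
    refine ⟨?_, ?_, ?_⟩
    · cases prev with
      | none => simp [pvChainOk]
      | some p =>
        simp only [pvChainOk]
        by_cases h : pvKeyCodes (pvItemKey it) < pvKeyCodes p <;>
          simp [h]
    · congr 1
      simp only [pvDupStep]
      split <;> rfl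
    · simp [List.append_assoc]

lemma pvChainOk_some_iff (p : List String) (ks : List (List String)) :
    pvChainOk (some p) ks = true ↔
      List.IsChain (fun a b => pvKeyCodes a ≤ pvKeyCodes b) (p :: ks) := by
  induction ks generalizing p with
  | nil => simp [pvChainOk, List.IsChain.singleton]
  | cons k ks ih => simp [pvChainOk, ih, not_lt, List.isChain_cons_cons]

lemma pvChainOk_none_iff (ks : List (List String)) :
    pvChainOk none ks = true ↔
      List.IsChain (fun a b => pvKeyCodes a ≤ pvKeyCodes b) ks := by
  cases ks with
  | nil => simp [pvChainOk]
  | cons k ks => simpa [pvChainOk] using pvChainOk_some_iff k ks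

-- the two instance bundles for sorted are the same (Decidable is a subsingleton)
lemma pvSorted_eq (ks : List (List String)) :
    PySem.List.sorted ks pvKeyCodes false
      = @PySem.List.sorted (List String) (List (List Nat)) _
          (@LinearOrder.toDecidableLT _ List.instLinearOrder) ks pvKeyCodes false := by
  congr 1

lemma pvSorted_self_iff (ks : List (List String)) :
    ks = PySem.List.sorted ks pvKeyCodes false ↔
      ks.Pairwise (fun a b => pvKeyCodes a ≤ pvKeyCodes b) := by
  rw [pvSorted_eq]
  constructor
  · intro h
    rw [h]
    exact PySem.List.sorted_pairwise ks pvKeyCodes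
  · intro h
    exact (PySem.List.sorted_eq_self_of_pairwise ks pvKeyCodes h).symm

lemma pvBool_eq (ks : List (List String)) :
    decide (ks = PySem.List.sorted ks pvKeyCodes false) = pvChainOk none ks := by
  haveI : Trans (fun (a b : List String) => pvKeyCodes a ≤ pvKeyCodes b)
      (fun a b => pvKeyCodes a ≤ pvKeyCodes b) (fun a b => pvKeyCodes a ≤ pvKeyCodes b) :=
    ⟨fun h1 h2 => le_trans h1 h2⟩
  rw [Bool.eq_iff_iff, decide_eq_true_iff, pvChainOk_none_iff, pvSorted_self_iff,
    List.isChain_iff_pairwise]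

-- ===== VERDICT (by name: the statement is the Claim_ definition above) =====
theorem is_sorted_unique_py_spec : Claim_equal_is_sorted_unique_py := by
  intro items _
  unfold Spec_is_sorted_unique_py is_sorted_unique_py is_sorted_unique_py_alt
  rw [pvAltLoop_spec]
  simp only [Bool.true_and, List.nil_append]
  rw [pvBool_eq]
  rfl
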